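-- pv_equiv track=rewrite | github.com/Sir-Roe/bootcamp | leet_code 150/arrays_hashing/#Given a sequence of integers as an arra.py | solution
-- ===== SOURCE A (Python) =====
-- def solution(se):
--     dropped = False
--     last = prev = min(se) -1
--     for elm in se:
--         if elm <= last:
--             if dropped:
--                 return False
--             else:
--                 dropped = True
--             if elm <= prev:
--                 prev = last
--             elif elm > prev:
--                 prev = last = elm
--         else:
--             prev, last = last, elm
--     return True
-- ===== SOURCE B (Python) =====
-- def solution(se):
--     if not se:
--         raise ValueError("empty sequence")
--     n = len(se)
--     bad = [i for i in range(1, n) if se[i] <= se[i - 1]]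
--     if len(bad) == 0:
--         return True
--     if len(bad) > 1:
--         return False
--     i = bad[0]
--     return i < 2 or se[i - 2] < se[i] or i == n - 1 or se[i - 1] < se[i + 1]
-- ===== Notes on version B (the rewrite author's own statement) =====
-- stated objective: alternative
-- what changed: A runs a single greedy state machine (dropped/last/prev) that repairs the sequence on the fly; B first collects all violation indices i with se[i] <= se[i-1] in one comprehension and then decides by counting them (0 -> True, >1 -> False, exactly 1 -> a neighbor test on the original elements).
import Mathlib
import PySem

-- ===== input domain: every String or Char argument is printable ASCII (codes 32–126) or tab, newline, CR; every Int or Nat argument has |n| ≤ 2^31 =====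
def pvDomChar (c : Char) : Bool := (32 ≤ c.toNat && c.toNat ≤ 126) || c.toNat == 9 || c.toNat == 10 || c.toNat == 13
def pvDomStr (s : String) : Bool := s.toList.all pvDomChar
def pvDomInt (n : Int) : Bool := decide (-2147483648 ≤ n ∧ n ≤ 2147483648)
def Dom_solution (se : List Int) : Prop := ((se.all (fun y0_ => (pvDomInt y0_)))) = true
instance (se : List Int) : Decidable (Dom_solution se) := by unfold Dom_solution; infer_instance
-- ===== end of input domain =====

-- B decides "almost strictly increasing" by collecting all violation indices first, instead of A's
-- on-the-fly greedy repair; same O(n) cost, different decomposition (objective: alternative).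

-- ===== PORT A =====
-- A's for-loop over the state (dropped, last, prev); branches in Python's order, the elif's
-- implicit "no case applies" leaves the state unchanged
def solGo : List Int → Bool → Int → Int → Bool
  | [], _, _, _ => true
  | elm :: rest, dropped, last, prev =>
    if elm ≤ last then
      if dropped then false
      else
        if elm ≤ prev then solGo rest true last last
        else if elm > prev then solGo rest true elm elm
        else solGo rest true last prev
    else solGo rest dropped elm last

def solution (se : List Int) : Bool :=
  match PySem.List.min? se (fun x => x) with
  | none => false  -- min(se) raises ValueError on empty se; excluded by Pre_solution
  | some m => solGo se false (m - 1) (m - 1)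

-- ===== PORT B =====
def solution_alt (se : List Int) : Bool :=
  if se = [] then false  -- Source B raises ValueError on empty se; excluded by Pre_solution
  else
    let n : Int := (se.length : Int)
    match (PySem.List.pyRange 1 n 1).filter
        (fun i => decide (PySem.List.pyGetD se i 0 ≤ PySem.List.pyGetD se (i - 1) 0)) with
    | [] => true
    | [i] =>
        decide (i < 2) || decide (PySem.List.pyGetD se (i - 2) 0 < PySem.List.pyGetD se i 0) ||
        decide (i = n - 1) || decide (PySem.List.pyGetD se (i - 1) 0 < PySem.List.pyGetD se (i + 1) 0)
    | _ => false

-- ===== PRECONDITION & SPEC =====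
-- Pre_ excludes only the empty list, on which A's min(se) raises ValueError (B raises too).
def Pre_solution (se : List Int) : Prop := se ≠ []
instance (se : List Int) : Decidable (Pre_solution se) := by unfold Pre_solution; infer_instance
def pvWitness_solution : List Int := [1, 3, 2, 4]

def Spec_solution (se : List Int) (out : Bool) : Prop := out = solution_alt se
instance (se : List Int) (out : Bool) : Decidable (Spec_solution se out) := by unfold Spec_solution; infer_instance

-- ===== CLAIM (what is proved, stated in full; the proofs are below) =====
def Claim_equal_solution : Prop := ∀ (se : List Int), Dom_solution se → Pre_solution se → Spec_solution se (solution se)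

-- ===== LEMMAS AND PROOFS =====

-- "the tail r is a strictly increasing chain above l"
def incFrom : Int → List Int → Bool
  | _, [] => true
  | l, e :: r => decide (l < e) && incFrom e r

-- the single-fix feasibility test at the first violation (p? = element two back, if any)
def condB : Option Int → Int → Int → List Int → Bool
  | p?, last, e, r =>
    (match p? with
     | none => true
     | some p => decide (p < e)) ||
    (match r with
     | [] => true
     | f :: _ => decide (last < f))

-- common reference: scan for the first violation, then (fix feasible) && (rest clean)
def bGo : Option Int → Int → List Int → Bool
  | _, _, [] => true
  | p?, last, e :: r => if e ≤ last then condB p? last e r && incFrom e r else bGo (some last) e r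

-- bad indices of se in [lo, hi)
def pvBadR (se : List Int) (lo hi : Int) : List Int :=
  (PySem.List.pyRange lo hi 1).filter
    (fun i => decide (PySem.List.pyGetD se i 0 ≤ PySem.List.pyGetD se (i - 1) 0))

lemma pv_getD_append (pre l2 : List Int) (k : Nat) (d : Int) :
    PySem.List.pyGetD (pre ++ l2) ((pre.length : Int) + (k : Int)) d = l2.getD k d := by
  have h : ((pre.length : Int) + (k : Int)) = ((pre.length + k : Nat) : Int) := by push_cast; ring
  rw [h, PySem.List.pyGetD_natCast, List.getD_eq_getElem?_getD, List.getD_eq_getElem?_getD,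
      List.getElem?_append_right (Nat.le_add_right _ _)]
  simp

lemma solGo_true (r : List Int) : ∀ (l p : Int), solGo r true l p = incFrom l r := by
  induction r with
  | nil => intro l p; rfl
  | cons e r ih =>
    intro l p
    by_cases h : e ≤ l
    · simp [solGo, incFrom, h, show ¬ l < e by omega]
    · simp [solGo, incFrom, h, ih, show l < e by omega]

lemma solGo_false_some (r : List Int) : ∀ (l p : Int), p < l →
    solGo r false l p = bGo (some p) l r := by
  induction r with
  | nil => intro l p _; rfl
  | cons e r ih =>
    intro l p hpl
    by_cases h : e ≤ l
    · by_cases h2 : e ≤ p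
      · rw [show solGo (e :: r) false l p = solGo r true l l from by simp [solGo, h, h2],
            solGo_true]
        rw [show bGo (some p) l (e :: r) = (condB (some p) l e r && incFrom e r) from by
              simp [bGo, h]]
        cases r with
        | nil => simp [incFrom, condB]
        | cons f r' =>
          by_cases hlf : l < f
          · simp [incFrom, condB, hlf, show e < f by omega]
          · simp [incFrom, condB, hlf, show ¬ p < e by omega]
      · rw [show solGo (e :: r) false l p = solGo r true e e from by
              simp [solGo, h, h2, show e > p by omega],
            solGo_true]
        simp [bGo, h, condB, show p < e by omega]
    · rw [show solGo (e :: r) false l p = solGo r false e l from by simp [solGo, h],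
          ih e l (by omega)]
      simp [bGo, h]

lemma solGo_false_none (r : List Int) : ∀ (l p : Int), (∀ e ∈ r, p < e) →
    solGo r false l p = bGo none l r := by
  induction r with
  | nil => intro l p _; rfl
  | cons e r ih =>
    intro l p hp
    have hpe : p < e := hp e (by simp)
    by_cases h : e ≤ l
    · rw [show solGo (e :: r) false l p = solGo r true e e from by
            simp [solGo, h, show ¬ e ≤ p by omega, show e > p by omega],
          solGo_true]
      simp [bGo, h, condB]
    · rw [show solGo (e :: r) false l p = solGo r false e l from by simp [solGo, h],
          solGo_false_some r e l (by omega)]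
      simp [bGo, h]

lemma solution_eq_bGo (a : Int) (r : List Int) : solution (a :: r) = bGo none a r := by
  obtain ⟨m, hm⟩ : ∃ m, PySem.List.min? (a :: r) (fun x => x) = some m :=
    ⟨r.foldl min a, PySem.List.min?_id_cons a r⟩
  have hmin : ∀ y ∈ a :: r, m ≤ y := fun y hy => PySem.List.min?_isMin hm y hy
  have ha : m ≤ a := hmin a (by simp)
  simp only [solution, hm]
  rw [show solGo (a :: r) false (m - 1) (m - 1) = solGo r false a (m - 1) from by
        simp [solGo, show ¬ a ≤ m - 1 by omega]]
  exact solGo_false_none r a (m - 1) (fun e he => by have := hmin e (by simp [he]); omega)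

lemma pvBadR_nil_of_inc (se : List Int) : ∀ (r pre : List Int) (a : Int),
    se = pre ++ a :: r → incFrom a r = true →
    pvBadR se ((pre.length : Int) + 1) (se.length : Int) = [] := by
  intro r
  induction r with
  | nil =>
    intro pre a hse _
    have hlen : (se.length : Int) ≤ (pre.length : Int) + 1 := by
      subst hse; simp; try omega
    rw [pvBadR, PySem.List.pyRange_one_eq_nil hlen]
    rfl
  | cons e r ih =>
    intro pre a hse hinc
    simp only [incFrom, Bool.and_eq_true, decide_eq_true_eq] at hinc
    obtain ⟨hae, hinc⟩ := hinc
    have hlen : (se.length : Int) = (pre.length : Int) + 2 + (r.length : Int) := by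
      subst hse; simp; omega
    have hA : PySem.List.pyGetD se ((pre.length : Int) + ((0 : Nat) : Int)) 0 = a := by
      rw [hse, pv_getD_append]; rfl
    have hE : PySem.List.pyGetD se ((pre.length : Int) + ((1 : Nat) : Int)) 0 = e := by
      rw [hse, pv_getD_append]; rfl
    rw [pvBadR, PySem.List.pyRange_one_cons (by omega), List.filter_cons]
    have hpred : decide (PySem.List.pyGetD se ((pre.length : Int) + 1) 0 ≤
        PySem.List.pyGetD se ((pre.length : Int) + 1 - 1) 0) = false := by
      rw [show (pre.length : Int) + 1 - 1 = (pre.length : Int) + ((0 : Nat) : Int) by push_cast; ring,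
          show (pre.length : Int) + 1 = (pre.length : Int) + ((1 : Nat) : Int) by push_cast; ring,
          hA, hE]
      simp; omega
    simp only [hpred, Bool.false_eq_true, if_false]
    have := ih (pre ++ [a]) e (by simp [hse]) hinc
    rw [pvBadR] at this
    rw [show (pre.length : Int) + 1 + 1 = ((pre ++ [a]).length : Int) + 1 by simp]
    exact this

lemma pvBadR_ne_nil_of_not_inc (se : List Int) : ∀ (r pre : List Int) (a : Int),
    se = pre ++ a :: r → incFrom a r = false →
    pvBadR se ((pre.length : Int) + 1) (se.length : Int) ≠ [] := by
  intro r
  induction r with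
  | nil => intro pre a _ hinc; simp [incFrom] at hinc
  | cons e r ih =>
    intro pre a hse hinc
    have hlen : (se.length : Int) = (pre.length : Int) + 2 + (r.length : Int) := by
      subst hse; simp; omega
    have hA : PySem.List.pyGetD se ((pre.length : Int) + ((0 : Nat) : Int)) 0 = a := by
      rw [hse, pv_getD_append]; rfl
    have hE : PySem.List.pyGetD se ((pre.length : Int) + ((1 : Nat) : Int)) 0 = e := by
      rw [hse, pv_getD_append]; rfl
    rw [pvBadR, PySem.List.pyRange_one_cons (by omega), List.filter_cons]
    by_cases hv : e ≤ a
    · have hpred : decide (PySem.List.pyGetD se ((pre.length : Int) + 1) 0 ≤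
          PySem.List.pyGetD se ((pre.length : Int) + 1 - 1) 0) = true := by
        rw [show (pre.length : Int) + 1 - 1 = (pre.length : Int) + ((0 : Nat) : Int) by push_cast; ring,
            show (pre.length : Int) + 1 = (pre.length : Int) + ((1 : Nat) : Int) by push_cast; ring,
            hA, hE]
        rw [decide_eq_true_eq]; omega
      rw [if_pos (show (fun i => decide (PySem.List.pyGetD se i 0 ≤
            PySem.List.pyGetD se (i - 1) 0)) ((pre.length : Int) + 1) = true from hpred)]
      simp
    · have hinc' : incFrom e r = false := by
        simp only [incFrom, Bool.and_eq_false_iff, decide_eq_false_iff_not] at hinc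
        rcases hinc with h | h
        · omega
        · exact h
      have hpred : decide (PySem.List.pyGetD se ((pre.length : Int) + 1) 0 ≤
          PySem.List.pyGetD se ((pre.length : Int) + 1 - 1) 0) = false := by
        rw [show (pre.length : Int) + 1 - 1 = (pre.length : Int) + ((0 : Nat) : Int) by push_cast; ring,
            show (pre.length : Int) + 1 = (pre.length : Int) + ((1 : Nat) : Int) by push_cast; ring,
            hA, hE]
        rw [decide_eq_false_iff_not]; omega
      simp only [hpred, Bool.false_eq_true, if_false]
      have := ih (pre ++ [a]) e (by simp [hse]) hinc'
      rw [pvBadR] at this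
      rw [show (pre.length : Int) + 1 + 1 = ((pre ++ [a]).length : Int) + 1 by simp]
      exact this

lemma alt_eq_bGo (se : List Int) : ∀ (r pre : List Int) (a : Int),
    se = pre ++ a :: r → pvBadR se 1 ((pre.length : Int) + 1) = [] →
    solution_alt se = bGo pre.getLast? a r := by
  intro r
  induction r with
  | nil =>
    intro pre a hse H
    have hne : se ≠ [] := by subst hse; simp
    have hlen : (se.length : Int) = (pre.length : Int) + 1 := by
      subst hse; simp
    have hfil : pvBadR se 1 (se.length : Int) = [] := by rw [hlen]; exact H
    rw [pvBadR] at hfil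
    simp only [solution_alt, if_neg hne, hfil, bGo]
  | cons e r ih =>
    intro pre a hse H
    have hne : se ≠ [] := by subst hse; simp
    have hlen : (se.length : Int) = (pre.length : Int) + 2 + (r.length : Int) := by
      subst hse; simp; omega
    have hA : PySem.List.pyGetD se ((pre.length : Int) + ((0 : Nat) : Int)) 0 = a := by
      rw [hse, pv_getD_append]; rfl
    have hE : PySem.List.pyGetD se ((pre.length : Int) + ((1 : Nat) : Int)) 0 = e := by
      rw [hse, pv_getD_append]; rfl
    have hsplit : pvBadR se 1 (se.length : Int) =
        pvBadR se 1 ((pre.length : Int) + 1) ++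
        pvBadR se ((pre.length : Int) + 1) (se.length : Int) := by
      rw [pvBadR, pvBadR, pvBadR,
          PySem.List.pyRange_one_append 1 ((pre.length : Int) + 1) (se.length : Int)
            (by omega) (by omega), List.filter_append]
    by_cases hv : e ≤ a
    · -- first violation at index pre.length + 1
      have hpred : decide (PySem.List.pyGetD se ((pre.length : Int) + 1) 0 ≤
          PySem.List.pyGetD se ((pre.length : Int) + 1 - 1) 0) = true := by
        rw [show (pre.length : Int) + 1 - 1 = (pre.length : Int) + ((0 : Nat) : Int) by push_cast; ring,
            show (pre.length : Int) + 1 = (pre.length : Int) + ((1 : Nat) : Int) by push_cast; ring,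
            hA, hE]
        rw [decide_eq_true_eq]; omega
      have hmid : pvBadR se ((pre.length : Int) + 1) (se.length : Int) =
          ((pre.length : Int) + 1) ::
          pvBadR se ((pre.length : Int) + 2) (se.length : Int) := by
        rw [pvBadR, pvBadR, PySem.List.pyRange_one_cons (by omega), List.filter_cons]
        simp only [hpred, if_true]
        rw [show (pre.length : Int) + 1 + 1 = (pre.length : Int) + 2 by ring]
      cases hinc : incFrom e r with
      | true =>
        have htail : pvBadR se ((pre.length : Int) + 2) (se.length : Int) = [] := by
          have := pvBadR_nil_of_inc se r (pre ++ [a]) e (by simp [hse]) hinc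
          rw [show ((pre ++ [a]).length : Int) + 1 = (pre.length : Int) + 2 by
                simp; omega] at this
          exact this
        have hfil : pvBadR se 1 (se.length : Int) = [(pre.length : Int) + 1] := by
          rw [hsplit, H, hmid, htail]; rfl
        rw [pvBadR] at hfil
        rw [show bGo pre.getLast? a (e :: r) = (condB pre.getLast? a e r && incFrom e r) from by
              simp [bGo, hv]]
        simp only [solution_alt, if_neg hne, hfil, hinc, Bool.and_true]
        -- the four neighbour facts
        have hprev : PySem.List.pyGetD se ((pre.length : Int) + 1 - 1) 0 = a := by
          rw [show (pre.length : Int) + 1 - 1 = (pre.length : Int) + ((0 : Nat) : Int) by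
                push_cast; ring, hse, pv_getD_append]; rfl
        have hcur : PySem.List.pyGetD se ((pre.length : Int) + 1) 0 = e := by
          rw [show (pre.length : Int) + 1 = (pre.length : Int) + ((1 : Nat) : Int) by
                push_cast; ring, hse, pv_getD_append]; rfl
        rw [hprev, hcur]
        rcases List.eq_nil_or_concat pre with rfl | ⟨q, p, rfl⟩
        · -- i = 1 < 2
          have h1 : decide ((0 : Int) + 1 < 2) = true := by simp
          cases r with
          | nil => simp [condB]
          | cons f r' => simp [condB]
        · -- pre = q ++ [p], so i ≥ 2 and se[i-2] = p
          simp only [List.concat_eq_append] at hse hlen ⊢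
          have hp2 : PySem.List.pyGetD se (((q ++ [p]).length : Int) + 1 - 2) 0 = p := by
            rw [show ((q ++ [p]).length : Int) + 1 - 2 = (q.length : Int) + ((0 : Nat) : Int) by
                  simp; omega,
                show se = q ++ (p :: a :: e :: r) by simp [hse], pv_getD_append]
            rfl
          have h1 : decide (((q ++ [p]).length : Int) + 1 < 2) = false := by
            rw [decide_eq_false_iff_not]; simp; try omega
          rw [hp2, h1]
          cases r with
          | nil =>
            have h3 : decide (((q ++ [p]).length : Int) + 1 = (se.length : Int) - 1) = true := by
              rw [decide_eq_true_eq]; simp at hlen ⊢; omega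
            rw [h3]
            simp [condB]
          | cons f r' =>
            have h3 : decide (((q ++ [p]).length : Int) + 1 = (se.length : Int) - 1) = false := by
              rw [decide_eq_false_iff_not]; simp at hlen ⊢; omega
            have hf : PySem.List.pyGetD se (((q ++ [p]).length : Int) + 1 + 1) 0 = f := by
              rw [show ((q ++ [p]).length : Int) + 1 + 1 = ((q ++ [p]).length : Int) + ((2 : Nat) : Int) by
                    push_cast; ring, hse, pv_getD_append]
              rfl
            rw [h3, hf]
            simp [condB]
      | false =>
        have htail := pvBadR_ne_nil_of_not_inc se r (pre ++ [a]) e (by simp [hse]) hinc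
        rw [show ((pre ++ [a]).length : Int) + 1 = (pre.length : Int) + 2 by
              simp; omega] at htail
        obtain ⟨x, xs, hx⟩ : ∃ x xs,
            pvBadR se ((pre.length : Int) + 2) (se.length : Int) = x :: xs := by
          cases h : pvBadR se ((pre.length : Int) + 2) (se.length : Int) with
          | nil => exact absurd h htail
          | cons x xs => exact ⟨x, xs, rfl⟩
        have hfil : pvBadR se 1 (se.length : Int) = ((pre.length : Int) + 1) :: x :: xs := by
          rw [hsplit, H, hmid, hx]; rfl
        rw [pvBadR] at hfil
        simp only [solution_alt, if_neg hne, hfil]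
        simp [bGo, hv, hinc]
    · -- a < e : the prefix extends
      have hpred : decide (PySem.List.pyGetD se ((pre.length : Int) + 1) 0 ≤
          PySem.List.pyGetD se ((pre.length : Int) + 1 - 1) 0) = false := by
        rw [show (pre.length : Int) + 1 - 1 = (pre.length : Int) + ((0 : Nat) : Int) by push_cast; ring,
            show (pre.length : Int) + 1 = (pre.length : Int) + ((1 : Nat) : Int) by push_cast; ring,
            hA, hE]
        rw [decide_eq_false_iff_not]; omega
      have H' : pvBadR se 1 (((pre ++ [a]).length : Int) + 1) = [] := by
        rw [show ((pre ++ [a]).length : Int) + 1 = (pre.length : Int) + 1 + 1 by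
              simp]
        rw [pvBadR, PySem.List.pyRange_one_succ_right (by omega), List.filter_append]
        rw [pvBadR] at H
        rw [H]
        simp only [List.filter_cons, List.filter_nil, hpred, Bool.false_eq_true, if_false]
        rfl
      have := ih (pre ++ [a]) e (by simp [hse]) H'
      rw [List.getLast?_concat] at this
      rw [this]
      simp [bGo, hv]

-- ===== VERDICT (by name: the statement is the Claim_ definition above) =====
theorem solution_spec : Claim_equal_solution := by
  unfold Claim_equal_solution
  intro se _ hpre
  unfold Spec_solution
  cases se with
  | nil => exact absurd rfl hpre
  | cons a r =>
    rw [solution_eq_bGo]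
    have h := alt_eq_bGo (a :: r) r [] a rfl (by
      rw [pvBadR]
      rw [show ((([] : List Int).length : Int) + 1) = (1 : Int) by simp,
          PySem.List.pyRange_one_eq_nil (le_refl 1)]
      rfl)
    simp only [List.getLast?_nil] at h
    exact h.symm
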